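-- pv_equiv track=rewrite | github.com/DevPastey/python | dsa.py | exclusive_products
-- ===== SOURCE A (Python) =====
-- def exclusive_products(inventory1, inventory2):
--     arr1 = [x.upper() for x in inventory1]
--     arr2 = [x.upper() for x in inventory2]
--
--     ex1 = set(arr1)
--     ex2 = set(arr2)
--
--     A = sorted(list(ex1 - ex2))
--     B = sorted(list(ex2 - ex1))
--
--     return A, B
-- ===== SOURCE B (Python) =====
-- def exclusive_products(inventory1, inventory2):
--     arr1 = sorted(x.upper() for x in inventory1)
--     arr2 = sorted(x.upper() for x in inventory2)
--     A, B = [], []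
--     i, j, n, m = 0, 0, len(arr1), len(arr2)
--     while i < n and j < m:
--         x, y = arr1[i], arr2[j]
--         if x < y:
--             A.append(x)
--             while i < n and arr1[i] == x:
--                 i += 1
--         elif y < x:
--             B.append(y)
--             while j < m and arr2[j] == y:
--                 j += 1
--         else:
--             while i < n and arr1[i] == x:
--                 i += 1
--             while j < m and arr2[j] == y:
--                 j += 1
--     while i < n:
--         x = arr1[i]
--         A.append(x)
--         while i < n and arr1[i] == x:
--             i += 1
--     while j < m:
--         y = arr2[j]
--         B.append(y)
--         while j < m and arr2[j] == y:
--             j += 1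
--     return A, B
-- ===== Notes on version B (the rewrite author's own statement) =====
-- stated objective: alternative
-- what changed: Replaces the two hash-set differences followed by two sorts with sorting both uppercased lists once and computing both exclusive sides in a single duplicate-collapsing merge walk with two indices.
import Mathlib
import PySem

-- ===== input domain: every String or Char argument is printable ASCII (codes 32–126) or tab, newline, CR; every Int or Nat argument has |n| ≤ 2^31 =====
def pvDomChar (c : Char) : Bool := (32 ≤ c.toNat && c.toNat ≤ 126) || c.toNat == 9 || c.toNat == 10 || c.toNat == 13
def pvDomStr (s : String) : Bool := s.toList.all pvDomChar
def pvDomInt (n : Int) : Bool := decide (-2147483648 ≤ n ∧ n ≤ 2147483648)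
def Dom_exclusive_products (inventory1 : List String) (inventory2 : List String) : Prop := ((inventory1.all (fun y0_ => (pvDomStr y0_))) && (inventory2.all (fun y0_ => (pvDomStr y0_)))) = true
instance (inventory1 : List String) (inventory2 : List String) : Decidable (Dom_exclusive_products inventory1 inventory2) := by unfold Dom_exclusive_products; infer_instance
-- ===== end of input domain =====

-- B replaces A's two hash-set differences + two sorts by sorting both uppercased
-- lists once and computing both exclusive sides in one duplicate-collapsing merge walk
-- (alternative decomposition, same asymptotic cost).

-- ===== PORT A =====
def exclusive_products (inventory1 : List String) (inventory2 : List String) : List String × List String :=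
  let arr1 := inventory1.map PySem.Str.upper
  let arr2 := inventory2.map PySem.Str.upper
  let ex1 := PySem.Set.ofList arr1
  let ex2 := PySem.Set.ofList arr2
  let A := PySem.List.sorted (PySem.Set.diff ex1 ex2) (fun x => x) false
  let B := PySem.List.sorted (PySem.Set.diff ex2 ex1) (fun x => x) false
  (A, B)

-- ===== PORT B =====
-- the inner 'while arr[i] == x: i += 1' run-skipping loop of Source B
def epSkip (x : String) : List String → List String
  | [] => []
  | y :: t => if y = x then epSkip x t else y :: t

theorem epSkip_length_le (x : String) (l : List String) : (epSkip x l).length ≤ l.length := by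
  induction l with
  | nil => simp [epSkip]
  | cons y t ih => simp only [epSkip]; split <;> simp; omega

-- the main two-index merge loop of Source B, as structural recursion on the two lists
def epMerge : List String → List String → List String × List String
  | [], [] => ([], [])
  | x :: t, [] =>
    let r := epMerge (epSkip x t) []
    (x :: r.1, r.2)
  | [], y :: u =>
    let r := epMerge [] (epSkip y u)
    (r.1, y :: r.2)
  | x :: t, y :: u =>
    if x < y then
      let r := epMerge (epSkip x t) (y :: u)
      (x :: r.1, r.2)
    else if y < x then
      let r := epMerge (x :: t) (epSkip y u)
      (r.1, y :: r.2)
    else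
      epMerge (epSkip x t) (epSkip y u)
termination_by l1 l2 => l1.length + l2.length
decreasing_by
  · have := epSkip_length_le x t; simp; omega
  · have := epSkip_length_le y u; simp; omega
  · have := epSkip_length_le x t; simp; omega
  · have := epSkip_length_le y u; simp; omega
  · have h1 := epSkip_length_le x t; have h2 := epSkip_length_le y u; simp; omega

def exclusive_products_alt (inventory1 : List String) (inventory2 : List String) : List String × List String :=
  let arr1 := PySem.List.sorted (inventory1.map PySem.Str.upper) (fun x => x) false
  let arr2 := PySem.List.sorted (inventory2.map PySem.Str.upper) (fun x => x) false
  epMerge arr1 arr2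

-- ===== PRECONDITION & SPEC =====
def Spec_exclusive_products (inventory1 : List String) (inventory2 : List String) (out : List String × List String) : Prop := out = exclusive_products_alt inventory1 inventory2
instance (inventory1 : List String) (inventory2 : List String) (out : List String × List String) : Decidable (Spec_exclusive_products inventory1 inventory2 out) := by unfold Spec_exclusive_products; infer_instance

-- ===== CLAIM (what is proved, stated in full; the proofs are below) =====
def Claim_equal_exclusive_products : Prop := ∀ (inventory1 : List String) (inventory2 : List String), Dom_exclusive_products inventory1 inventory2 → Spec_exclusive_products inventory1 inventory2 (exclusive_products inventory1 inventory2)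

-- ===== LEMMAS AND PROOFS =====

theorem epSkip_spec (x : String) (t : List String)
    (ht : t.Pairwise (· ≤ ·)) (hx : ∀ y ∈ t, x ≤ y) :
    (epSkip x t).Pairwise (· ≤ ·) ∧ (∀ y ∈ epSkip x t, x < y) ∧
    (∀ y, y ∈ epSkip x t ↔ y ∈ t ∧ y ≠ x) := by
  induction t with
  | nil => simp [epSkip]
  | cons z t ih =>
    rw [List.pairwise_cons] at ht
    simp only [epSkip]
    split
    · rename_i hz
      subst hz
      have := ih ht.2 (fun y hy => le_trans (hx z (by simp)) (ht.1 y hy))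
      refine ⟨this.1, this.2.1, fun y => ?_⟩
      rw [this.2.2 y]
      simp only [List.mem_cons]
      constructor
      · rintro ⟨hy, hne⟩; exact ⟨Or.inr hy, hne⟩
      · rintro ⟨hy | hy, hne⟩
        · exact absurd rfl (hy ▸ hne)
        · exact ⟨hy, hne⟩
    · rename_i hz
      have hxz : x < z := lt_of_le_of_ne (hx z (by simp)) (fun h => hz h.symm)
      refine ⟨List.pairwise_cons.mpr ht, ?_, fun y => ?_⟩
      · intro y hy
        rcases List.mem_cons.mp hy with h | h
        · exact h ▸ hxz
        · exact lt_of_lt_of_le hxz (ht.1 y h)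
      · constructor
        · intro hy
          refine ⟨hy, ?_⟩
          rcases List.mem_cons.mp hy with h | h
          · exact h ▸ fun he => hz he
          · exact ne_of_gt (lt_of_lt_of_le hxz (ht.1 y h))
        · exact fun h => h.1

theorem epMerge_spec (l1 l2 : List String)
    (h1 : l1.Pairwise (· ≤ ·)) (h2 : l2.Pairwise (· ≤ ·)) :
    (epMerge l1 l2).1.Pairwise (· < ·) ∧
    (∀ z, z ∈ (epMerge l1 l2).1 ↔ z ∈ l1 ∧ z ∉ l2) ∧
    (epMerge l1 l2).2.Pairwise (· < ·) ∧
    (∀ z, z ∈ (epMerge l1 l2).2 ↔ z ∈ l2 ∧ z ∉ l1) := by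
  induction l1, l2 using epMerge.induct with
  | case1 => simp [epMerge]
  | case2 x t ih =>
    rw [List.pairwise_cons] at h1
    obtain ⟨hs, hgt, hmem⟩ := epSkip_spec x t h1.2 h1.1
    obtain ⟨ia, ma, ib, mb⟩ := ih hs (by simp)
    simp only [epMerge]
    refine ⟨?_, fun z => ?_, ib, fun z => ?_⟩
    · exact List.pairwise_cons.mpr ⟨fun z hz => hgt z (((ma z).mp (by simpa using hz)).1), ia⟩
    · simp only [List.mem_cons, ma, hmem, List.not_mem_nil]
      by_cases hzx : z = x <;> tauto
    · simp only [mb]; simp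
  | case3 y u ih =>
    rw [List.pairwise_cons] at h2
    obtain ⟨hs, hgt, hmem⟩ := epSkip_spec y u h2.2 h2.1
    obtain ⟨ia, ma, ib, mb⟩ := ih (by simp) hs
    simp only [epMerge]
    refine ⟨ia, fun z => ?_, ?_, fun z => ?_⟩
    · simp only [ma]; simp
    · exact List.pairwise_cons.mpr ⟨fun z hz => hgt z (((mb z).mp (by simpa using hz)).1), ib⟩
    · simp only [List.mem_cons, mb, hmem, List.not_mem_nil]
      by_cases hzy : z = y <;> tauto
  | case4 x t y u hxy ih =>
    have h1' := List.pairwise_cons.mp h1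
    obtain ⟨hs, hgt, hmem⟩ := epSkip_spec x t h1'.2 h1'.1
    obtain ⟨ia, ma, ib, mb⟩ := ih hs h2
    have h2' := List.pairwise_cons.mp h2
    have hzne : ∀ z : String, z ∈ y :: u → z ≠ x := by
      intro z hz he
      subst he
      rcases List.mem_cons.mp hz with h | h
      · exact absurd (h ▸ hxy) (lt_irrefl _)
      · exact absurd (lt_of_lt_of_le hxy (h2'.1 z h)) (lt_irrefl z)
    simp only [epMerge, if_pos hxy]
    refine ⟨?_, fun z => ?_, ib, fun z => ?_⟩
    · exact List.pairwise_cons.mpr ⟨fun z hz => hgt z (((ma z).mp (by simpa using hz)).1), ia⟩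
    · have hne := hzne z
      simp only [List.mem_cons] at hne
      simp only [List.mem_cons, ma, hmem]
      by_cases hzx : z = x <;> tauto
    · have hne := hzne z
      simp only [List.mem_cons] at hne
      simp only [List.mem_cons, mb, hmem]
      tauto
  | case5 x t y u hxy hyx ih =>
    have h2' := List.pairwise_cons.mp h2
    obtain ⟨hs2, hgt2, hmem2⟩ := epSkip_spec y u h2'.2 h2'.1
    obtain ⟨ia, ma, ib, mb⟩ := ih h1 hs2
    have h1' := List.pairwise_cons.mp h1
    have hzne : ∀ z : String, z ∈ x :: t → z ≠ y := by
      intro z hz he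
      subst he
      rcases List.mem_cons.mp hz with h | h
      · exact absurd (h ▸ hyx) (lt_irrefl _)
      · exact absurd (lt_of_lt_of_le hyx (h1'.1 z h)) (lt_irrefl z)
    simp only [epMerge, if_neg hxy, if_pos hyx]
    refine ⟨ia, fun z => ?_, ?_, fun z => ?_⟩
    · have hne := hzne z
      simp only [List.mem_cons] at hne
      simp only [List.mem_cons, ma, hmem2]
      tauto
    · exact List.pairwise_cons.mpr ⟨fun z hz => hgt2 z (((mb z).mp (by simpa using hz)).1), ib⟩
    · have hne := hzne z
      simp only [List.mem_cons] at hne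
      simp only [List.mem_cons, mb, hmem2]
      by_cases hzy : z = y <;> tauto
  | case6 x t y u hxy hyx ih =>
    have hxyeq : x = y := le_antisymm (not_lt.mp hyx) (not_lt.mp hxy)
    subst hxyeq
    have h1' := List.pairwise_cons.mp h1
    have h2' := List.pairwise_cons.mp h2
    obtain ⟨hs1, hgt1, hmem1⟩ := epSkip_spec x t h1'.2 h1'.1
    obtain ⟨hs2, hgt2, hmem2⟩ := epSkip_spec x u h2'.2 h2'.1
    obtain ⟨ia, ma, ib, mb⟩ := ih hs1 hs2
    simp only [epMerge, if_neg hxy]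
    refine ⟨ia, fun z => ?_, ib, fun z => ?_⟩
    · simp only [List.mem_cons, ma, hmem1, hmem2]
      by_cases hzx : z = x <;> tauto
    · simp only [List.mem_cons, mb, hmem1, hmem2]
      by_cases hzx : z = x <;> tauto

-- sorted set-difference (A's side) equals the corresponding merge component
theorem ep_eq (arr1 arr2 : List String) :
    (PySem.List.sorted (PySem.Set.diff (PySem.Set.ofList arr1) (PySem.Set.ofList arr2)) (fun x => x) false,
     PySem.List.sorted (PySem.Set.diff (PySem.Set.ofList arr2) (PySem.Set.ofList arr1)) (fun x => x) false) =
    epMerge (PySem.List.sorted arr1 (fun x => x) false) (PySem.List.sorted arr2 (fun x => x) false) := by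
  set s1 := PySem.List.sorted arr1 (fun x => x) false with hs1
  set s2 := PySem.List.sorted arr2 (fun x => x) false with hs2
  have hp1 : s1.Pairwise (· ≤ ·) := PySem.List.sorted_pairwise arr1 (fun x => x)
  have hp2 : s2.Pairwise (· ≤ ·) := PySem.List.sorted_pairwise arr2 (fun x => x)
  obtain ⟨ia, ma, ib, mb⟩ := epMerge_spec s1 s2 hp1 hp2
  have hm1 : ∀ z : String, z ∈ s1 ↔ z ∈ arr1 := fun z => PySem.List.mem_sorted _ _ _ _
  have hm2 : ∀ z : String, z ∈ s2 ↔ z ∈ arr2 := fun z => PySem.List.mem_sorted _ _ _ _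
  refine Prod.ext ?_ ?_
  · apply PySem.List.sorted_eq_of_perm_of_pairwise_lt
    · apply (List.perm_ext_iff_of_nodup ia.nodup
        (PySem.Set.nodup_diff _ _ (PySem.Set.nodup_ofList arr1))).mpr
      intro z
      rw [ma z, PySem.Set.mem_diff, PySem.Set.mem_ofList, PySem.Set.mem_ofList, hm1, hm2]
    · exact ia
  · apply PySem.List.sorted_eq_of_perm_of_pairwise_lt
    · apply (List.perm_ext_iff_of_nodup ib.nodup
        (PySem.Set.nodup_diff _ _ (PySem.Set.nodup_ofList arr2))).mpr
      intro z
      rw [mb z, PySem.Set.mem_diff, PySem.Set.mem_ofList, PySem.Set.mem_ofList, hm1, hm2]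
    · exact ib

-- ===== VERDICT (by name: the statement is the Claim_ definition above) =====
theorem exclusive_products_spec : Claim_equal_exclusive_products := by
  intro inv1 inv2 _
  unfold Spec_exclusive_products exclusive_products exclusive_products_alt
  simpa using ep_eq (inv1.map PySem.Str.upper) (inv2.map PySem.Str.upper)
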